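-- pv_equiv track=rewrite | github.com/NikolayMorozov/sudoku | solution.py | isThereNT
-- ===== SOURCE A (Python) =====
-- def isThereNT(values, unit):
--     '''Function identifies naked_twins within given unit
--     Args:
--         values(dict): a dictionary of the form {'box_name': '123456789', ...}
--         unit(list): a list of boxes within unit ['A1', ...]
--     Returns:
--         NT(set): a set of Naked Twins {box_value, ...}
--
--     '''
--     # count values within unit
--     count = {}
--     for box in unit:
--         # condition that satisfy naked twins definition
--         if len(values[box])==2:
--             if values[box] in count:
--                 count[values[box]]+=1
--             else:
--                 count[values[box]] = 1
--     # naked twins set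
--     NT = {c for c in count if count[c] == 2}
--     return NT
-- ===== SOURCE B (Python) =====
-- def isThereNT(values, unit):
--     # Alternative algorithm: iterative partition-extraction. Repeatedly take the
--     # first remaining length-2 value, split the rest of the worklist into its
--     # duplicates and everything else; the value is a naked twin iff it has
--     # exactly one duplicate. No counter dict is ever built.
--     twos = [values[box] for box in unit if len(values[box]) == 2]
--     NT = set()
--     rest = twos
--     while rest:
--         v = rest[0]
--         dups = 0
--         nxt = []
--         for x in rest[1:]:
--             if x == v:
--                 dups += 1
--             else:
--                 nxt.append(x)
--         if dups == 1:
--             NT.add(v)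
--         rest = nxt
--     return NT
-- ===== Notes on version B (the rewrite author's own statement) =====
-- stated objective: alternative
-- what changed: Replaces A's incrementally maintained hash counter (a dict updated with in/+=/= branches, then filtered) by iterative partition-extraction: repeatedly take the first remaining length-2 value, partition the worklist into its duplicates and the rest, and emit the value when it has exactly one duplicate; no counting structure is ever built.
import Mathlib
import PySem

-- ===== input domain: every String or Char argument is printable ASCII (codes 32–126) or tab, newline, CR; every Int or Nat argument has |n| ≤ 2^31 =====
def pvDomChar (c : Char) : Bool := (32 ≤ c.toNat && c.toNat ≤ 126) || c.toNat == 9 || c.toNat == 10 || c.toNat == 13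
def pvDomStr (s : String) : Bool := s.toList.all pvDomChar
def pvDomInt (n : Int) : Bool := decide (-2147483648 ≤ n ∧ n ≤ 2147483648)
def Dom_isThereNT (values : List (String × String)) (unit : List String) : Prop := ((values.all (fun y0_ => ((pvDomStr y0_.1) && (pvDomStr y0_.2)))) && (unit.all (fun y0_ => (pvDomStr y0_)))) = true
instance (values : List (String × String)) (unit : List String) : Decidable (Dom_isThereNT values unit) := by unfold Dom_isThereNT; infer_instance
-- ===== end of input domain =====

-- B replaces A's incrementally maintained counting dict by iterative partition-extraction
-- (repeatedly split the worklist on its first value, no counting structure); objective: alternative.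

-- ===== PORT A =====
def isThereNT (values : List (String × String)) (unit : List String) : List String :=
  -- count = {}; for box in unit: if len(values[box])==2: ... (dict counter)
  let count : PySem.Dict String Int := unit.foldl (fun count box =>
    let v := PySem.Dict.getD (PySem.Dict.mk values) box ""
    if PySem.Str.len v = 2 then
      if count.contains v then count.modify v 0 (· + 1)   -- count[values[box]] += 1
      else count.insert v 1                                -- count[values[box]] = 1
    else count) PySem.Dict.empty
  -- NT = {c for c in count if count[c] == 2}
  PySem.Set.ofList (count.keys.filter (fun c => count.getD c 0 = 2))

-- ===== PORT B =====
-- inner for-loop of Source B: partition rest[1:] into (number of duplicates of v, everything else)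
-- (this lemma is cited by ntLoop's decreasing_by, so it stays above the port)
theorem ntInner_spec (v : String) : ∀ (tail : List String) (d : Int) (acc : List String),
    tail.foldl (fun (p : Int × List String) x =>
      if x == v then (p.1 + 1, p.2) else (p.1, p.2 ++ [x])) (d, acc)
    = (d + ((tail.filter (fun x => x == v)).length : Int),
       acc ++ tail.filter (fun x => !(x == v))) := by
  intro tail
  induction tail with
  | nil => intro d acc; simp
  | cons y ys ih =>
    intro d acc
    by_cases h : (y == v) = true
    · rw [List.foldl_cons, if_pos h, ih]
      simp [h]
      ring
    · rw [List.foldl_cons, if_neg h, ih]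
      have hb : (y == v) = false := by simpa using h
      simp [hb]

-- the inner for-loop of Source B as its own helper: dups/nxt partition of rest[1:]
def ntPartition (v : String) (tail : List String) : Int × List String :=
  tail.foldl (fun (p : Int × List String) x =>
    if x == v then (p.1 + 1, p.2) else (p.1, p.2 ++ [x])) ((0 : Int), ([] : List String))

theorem ntPartition_spec (v : String) (tail : List String) :
    ntPartition v tail = (((tail.filter (fun x => x == v)).length : Int),
      tail.filter (fun x => !(x == v))) := by
  simpa [ntPartition] using ntInner_spec v tail 0 []

-- while rest: v = rest[0]; partition rest[1:]; NT.add(v) if exactly one duplicate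
def ntLoop (nt : List String) (rest : List String) : List String :=
  match rest with
  | [] => nt
  | v :: tail =>
    let p := ntPartition v tail
    ntLoop (if p.1 = 1 then PySem.Set.add nt v else nt) p.2
termination_by rest.length
decreasing_by
  simp only [ntPartition_spec]
  simpa using Nat.lt_succ_of_le (List.length_filter_le _ tail)

def isThereNT_alt (values : List (String × String)) (unit : List String) : List String :=
  -- twos = [values[box] for box in unit if len(values[box]) == 2]
  let twos := unit.filterMap (fun box =>
    let v := PySem.Dict.getD (PySem.Dict.mk values) box ""
    if PySem.Str.len v = 2 then some v else none)
  -- NT = set(); while-loop over the worklist twos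
  ntLoop PySem.Set.empty twos

-- ===== PRECONDITION & SPEC =====
-- Pre_ excludes exactly the inputs on which A (and B alike) raises KeyError:
-- some box of unit is not a key of values.
def Pre_isThereNT (values : List (String × String)) (unit : List String) : Prop :=
  unit.all (fun b => (PySem.Dict.get? (PySem.Dict.mk values) b).isSome) = true
instance (values : List (String × String)) (unit : List String) : Decidable (Pre_isThereNT values unit) := by unfold Pre_isThereNT; infer_instance
def pvWitness_isThereNT : (List (String × String)) × List String :=
  ([("A1", "23"), ("A2", "23"), ("A3", "4")], ["A1", "A2", "A3"])
def Spec_isThereNT (values : List (String × String)) (unit : List String) (out : List String) : Prop := out = isThereNT_alt values unit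
instance (values : List (String × String)) (unit : List String) (out : List String) : Decidable (Spec_isThereNT values unit out) := by unfold Spec_isThereNT; infer_instance

-- ===== CLAIM (what is proved, stated in full; the proofs are below) =====
def Claim_equal_isThereNT : Prop := ∀ (values : List (String × String)) (unit : List String), Dom_isThereNT values unit → Pre_isThereNT values unit → Spec_isThereNT values unit (isThereNT values unit)

-- ===== LEMMAS AND PROOFS =====

-- When the key is absent, `count[v] = 1` is the same dict operation as `d.modify v 0 (·+1)`.
theorem insert_one_of_not_contains {d : PySem.Dict String Int} {v : String}
    (h : d.contains v = false) : d.insert v 1 = d.modify v 0 (· + 1) := by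
  have hg : d.getD v 0 = 0 := by
    simp only [PySem.Dict.getD, PySem.Dict.get?]
    simp only [PySem.Dict.contains, List.any_eq_false] at h
    rw [List.find?_eq_none.mpr (fun p hp => by simpa using h p hp)]
    rfl
  simp [PySem.Dict.modify, hg]

-- A's loop over `unit` is the plain counter fold over the list of length-2 values.
theorem foldA_eq_counter_fold (g : String → String) (unit : List String)
    (d : PySem.Dict String Int) :
    unit.foldl (fun count box =>
        let v := g box
        if PySem.Str.len v = 2 then
          if count.contains v then count.modify v 0 (· + 1) else count.insert v 1
        else count) d
      = (unit.filterMap (fun box => let v := g box;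
          if PySem.Str.len v = 2 then some v else none)).foldl
          (fun d x => d.modify x 0 (· + 1)) d := by
  induction unit generalizing d with
  | nil => rfl
  | cons b bs ih =>
    simp only [List.foldl_cons, List.filterMap_cons]
    by_cases h2 : PySem.Str.len (g b) = 2
    · simp only [if_pos h2]
      by_cases hc : d.contains (g b) = true
      · simp only [if_pos hc, List.foldl_cons]
        exact ih _
      · have hc' : d.contains (g b) = false := by simpa using hc
        simp only [if_neg hc, List.foldl_cons, insert_one_of_not_contains hc']
        exact ih _
    · simp only [if_neg h2]
      exact ih _

-- Set.add of a fresh element appends it.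
theorem set_add_of_not_mem {s : List String} {a : String} (h : a ∉ s) :
    PySem.Set.add s a = s ++ [a] := by
  simp [PySem.Set.add, PySem.Set.contains, h]

-- folding Set.add ignores occurrences of an element already in the accumulator
theorem foldl_add_erase (x : String) : ∀ (l s : List String), x ∈ s →
    l.foldl PySem.Set.add s = (l.filter (fun y => !(y == x))).foldl PySem.Set.add s := by
  intro l
  induction l with
  | nil => intro s _; rfl
  | cons y ys ih =>
    intro s hx
    by_cases h : y = x
    · have hadd : PySem.Set.add s y = s := by
        subst h; simp [PySem.Set.add, hx]
      have hb : (y == x) = true := by simp [h]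
      rw [List.foldl_cons, hadd, List.filter_cons]
      simp only [hb, Bool.not_true, if_neg, Bool.false_eq_true, not_false_iff]
      exact ih s hx
    · have hb : (y == x) = false := by simp [h]
      rw [List.foldl_cons, List.filter_cons]
      simp only [hb, Bool.not_false, if_pos, List.foldl_cons]
      refine ih _ ?_
      by_cases hm : y ∈ s
      · simpa [PySem.Set.add, hm] using hx
      · simp [PySem.Set.add, hm]
        exact Or.inl hx

-- a head not occurring later rides along in front of the accumulator
theorem foldl_add_notmem (a : String) : ∀ (l s : List String), a ∉ l →
    l.foldl PySem.Set.add (a :: s) = a :: l.foldl PySem.Set.add s := by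
  intro l
  induction l with
  | nil => intro s _; rfl
  | cons y ys ih =>
    intro s h
    have hya : y ≠ a := fun e => h (by simp [e])
    have hstep : PySem.Set.add (a :: s) y
        = a :: PySem.Set.add s y := by
      by_cases hm : y ∈ s
      · simp [PySem.Set.add, hm, List.mem_cons, hya]
      · have : y ∉ (a :: s) := by simp [hya, hm]
        simp [PySem.Set.add, hm, this]
    rw [List.foldl_cons, List.foldl_cons, hstep]
    exact ih _ (fun hm => h (List.mem_cons_of_mem _ hm))

-- first-occurrence dedup, one step
theorem ofList_cons (v : String) (l : List String) :
    PySem.Set.ofList (v :: l) = v :: PySem.Set.ofList (l.filter (fun y => !(y == v))) := by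
  have h1 : PySem.Set.ofList (v :: l) = l.foldl PySem.Set.add [v] := by
    simp [PySem.Set.ofList_eq_foldl]
  rw [h1, foldl_add_erase v l [v] (by simp), foldl_add_notmem v _ [] (by simp),
    PySem.Set.ofList_eq_foldl]

-- The worklist loop of B computes: accumulator ++ values occurring exactly twice,
-- deduped in first-occurrence order.
theorem ntLoop_spec : ∀ (n : ℕ) (l nt : List String), l.length ≤ n → (∀ x ∈ l, x ∉ nt) →
    ntLoop nt l = nt ++ (PySem.Set.ofList l).filter (fun v => decide (List.count v l = 2)) := by
  intro n
  induction n with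
  | zero =>
    intro l nt hl _
    have : l = [] := List.eq_nil_of_length_eq_zero (Nat.le_zero.mp hl)
    subst this; simp [ntLoop]
  | succ n ih =>
    intro l nt hl hfresh
    match l with
    | [] => simp [ntLoop]
    | v :: tail =>
      rw [ntLoop]
      simp only [ntPartition_spec]
      set q : String → Bool := fun y => !(y == v) with hq
      set nxt := tail.filter q with hnxt
      have hlen : nxt.length ≤ n := le_trans (List.length_filter_le _ _) (Nat.succ_le_succ_iff.mp hl)
      have hcnt : (tail.filter (fun x => x == v)).length = tail.count v := by
        simp [List.count_eq_countP, List.countP_eq_length_filter]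
      have hvnt : v ∉ nt := hfresh v (by simp)
      have hfresh' : ∀ nt', nt' = nt ∨ nt' = nt ++ [v] → ∀ x ∈ nxt, x ∉ nt' := by
        rintro nt' (rfl | rfl) x hx
        · exact hfresh x (by
            rcases List.of_mem_filter hx with _
            exact List.mem_cons_of_mem _ (List.mem_of_mem_filter hx))
        · have hxv : x ≠ v := by
            have := List.of_mem_filter hx; simpa [hq] using this
          have : x ∉ nt := hfresh x (List.mem_cons_of_mem _ (List.mem_of_mem_filter hx))
          simp [this, hxv]
      have hrec : ∀ nt', (∀ x ∈ nxt, x ∉ nt') →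
          ntLoop nt' nxt = nt' ++ (PySem.Set.ofList nxt).filter (fun x => decide (List.count x nxt = 2)) :=
        fun nt' h' => ih nxt nt' hlen h'
      -- rewrite the target's filtered dedup of v::tail
      have htail : (PySem.Set.ofList (v :: tail)).filter (fun x => decide (List.count x (v :: tail) = 2))
          = (if tail.count v = 1 then [v] else [])
            ++ (PySem.Set.ofList nxt).filter (fun x => decide (List.count x nxt = 2)) := by
        rw [ofList_cons]
        rw [List.filter_cons]
        have h2 : (PySem.Set.ofList nxt).filter (fun x => decide (List.count x (v :: tail) = 2))
            = (PySem.Set.ofList nxt).filter (fun x => decide (List.count x nxt = 2)) := by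
          apply List.filter_congr
          intro x hx
          have hxn : x ∈ nxt := by simpa using hx
          have hxv : x ≠ v := by
            have := List.of_mem_filter hxn; simpa [hq] using this
          have c1 : List.count x (v :: tail) = List.count x tail := by
            simp [Ne.symm hxv]
          have c2 : List.count x nxt = List.count x tail := by
            rw [hnxt]; exact List.count_filter (by simp [hq, hxv])
          rw [c1, c2]
        rw [h2]
        by_cases hone : tail.count v = 1
        · simp [List.count_cons_self, hone]
        · have hno : ¬ (List.count v (v :: tail) = 2) := by
            simp [List.count_cons_self]; omega
          simp [hone]
      by_cases hone : tail.count v = 1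
      · have hsel : ((0 : Int) + ((tail.filter (fun x => x == v)).length : Int) = 1) := by
          rw [hcnt, hone]; simp
        rw [if_pos (by simpa using hsel)]
        rw [set_add_of_not_mem hvnt]
        rw [hrec (nt ++ [v]) (hfresh' _ (Or.inr rfl)), htail, if_pos hone]
        simp
      · have hsel : ¬ ((0 : Int) + ((tail.filter (fun x => x == v)).length : Int) = 1) := by
          rw [hcnt]; omega
        rw [if_neg (by simpa using hsel)]
        rw [hrec nt (hfresh' _ (Or.inl rfl)), htail, if_neg hone]
        simp

-- ===== VERDICT (by name: the statement is the Claim_ definition above) =====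
theorem isThereNT_spec : Claim_equal_isThereNT := by
  intro values unit _ _
  unfold Spec_isThereNT isThereNT isThereNT_alt
  rw [foldA_eq_counter_fold]
  set g := fun box => PySem.Dict.getD (PySem.Dict.mk values) box ""
  set twos := unit.filterMap (fun box => let v := g box;
      if PySem.Str.len v = 2 then some v else none) with htwos
  have hkeys : (twos.foldl (fun d x => d.modify x 0 (· + 1))
      (PySem.Dict.empty : PySem.Dict String Int)).keys = PySem.Set.ofList twos := by
    have := PySem.Dict.keys_foldl_modify twos (0 : Int)
      (fun _ _ w => w + 1) PySem.Dict.empty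
    simpa [PySem.Set.update, PySem.Set.ofList] using this
  have hgetD : ∀ v, (twos.foldl (fun d x => d.modify x 0 (· + 1))
      (PySem.Dict.empty : PySem.Dict String Int)).getD v 0 = (List.count v twos : Int) := by
    intro v
    simpa using PySem.Dict.getD_foldl_modify_add_one twos PySem.Dict.empty v
  have hpred : (fun c => decide ((twos.foldl (fun d x => d.modify x 0 (· + 1))
        (PySem.Dict.empty : PySem.Dict String Int)).getD c 0 = 2))
      = (fun v => decide (List.count v twos = 2)) := by
    funext v
    simp [hgetD v]
    omega
  have hB : ntLoop PySem.Set.empty twos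
      = (PySem.Set.ofList twos).filter (fun v => decide (List.count v twos = 2)) := by
    have := ntLoop_spec twos.length twos [] le_rfl (by simp)
    simpa using this
  have hnd : ((PySem.Set.ofList twos).filter (fun v => decide (List.count v twos = 2))).Nodup :=
    (PySem.Set.nodup_ofList twos).filter _
  simp only [hkeys, hpred, hB]
  exact PySem.Set.ofList_eq_self_of_nodup _ hnd
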